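-- pv_equiv track=rewrite | github.com/svinkapeppa/MIPT_ALGEBRA_ALGO | task_6/pagerank.py | get_vertices
-- ===== SOURCE A (Python) =====
-- def get_vertices(edges):
--     vertices = {}
--
--     for edge in edges:
--         if edge[0] not in vertices:
--             vertices[edge[0]] = len(vertices)
--         if edge[1] not in vertices:
--             vertices[edge[1]] = len(vertices)
--
--     return vertices
-- ===== SOURCE B (Python) =====
-- def get_vertices(edges):
--     # Record each vertex's first-occurrence timestamp in the flattened endpoint
--     # stream, then assign indices by sorting the vertices by that timestamp.
--     first = {}
--     for t, v in enumerate(v for edge in edges for v in (edge[0], edge[1])):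
--         if v not in first:
--             first[v] = t
--     return {v: i for i, v in enumerate(sorted(first, key=first.get))}
-- ===== Notes on version B (the rewrite author's own statement) =====
-- stated objective: alternative
-- what changed: B assigns indices by rank: it records each vertex's first-occurrence timestamp in the flattened endpoint stream and then numbers the vertices after sorting them by timestamp, a sort-based ranking instead of A's incremental len(dict) numbering inside the insertion pass.
import Mathlib
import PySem

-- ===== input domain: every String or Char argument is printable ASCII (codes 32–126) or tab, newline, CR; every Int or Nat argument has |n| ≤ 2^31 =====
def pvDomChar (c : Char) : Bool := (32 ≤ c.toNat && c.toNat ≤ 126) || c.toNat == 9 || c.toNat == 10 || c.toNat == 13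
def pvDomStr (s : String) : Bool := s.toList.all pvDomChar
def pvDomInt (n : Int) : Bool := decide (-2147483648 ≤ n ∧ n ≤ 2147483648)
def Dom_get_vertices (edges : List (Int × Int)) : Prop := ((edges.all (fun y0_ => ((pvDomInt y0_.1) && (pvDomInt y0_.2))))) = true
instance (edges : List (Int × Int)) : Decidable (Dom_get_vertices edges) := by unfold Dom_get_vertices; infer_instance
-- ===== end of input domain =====

-- B replaces A's incremental len(dict) numbering by a sort-based ranking:
-- record first-occurrence timestamps, sort the vertices by timestamp, number them.

-- ===== PORT A =====
def get_vertices (edges : List (Int × Int)) : List (Int × Int) :=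
  (edges.foldl (fun vertices edge =>
      let vertices := if vertices.contains edge.1 then vertices
        else vertices.insert edge.1 ((vertices.size : Nat) : Int)
      if vertices.contains edge.2 then vertices
        else vertices.insert edge.2 ((vertices.size : Nat) : Int))
    (PySem.Dict.empty : PySem.Dict Int Int)).items

-- ===== PORT B =====
-- 'sorted(first, key=first.get)': every key is present in 'first', so Python's
-- first.get returns its stored timestamp there; 'first.getD v 0' is exact on the keys.
def get_vertices_alt (edges : List (Int × Int)) : List (Int × Int) :=
  let flat := edges.flatMap (fun edge => [edge.1, edge.2])
  let first := (PySem.List.enumerate flat 0).foldl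
      (fun d p => if d.contains p.2 then d else d.insert p.2 p.1)
      (PySem.Dict.empty : PySem.Dict Int Int)
  let order := PySem.List.sorted first.keys (fun v => first.getD v 0) false
  (PySem.List.enumerate order 0).map (fun p => (p.2, p.1))

-- ===== PRECONDITION & SPEC =====
def Spec_get_vertices (edges : List (Int × Int)) (out : List (Int × Int)) : Prop := out = get_vertices_alt edges
instance (edges : List (Int × Int)) (out : List (Int × Int)) : Decidable (Spec_get_vertices edges out) := by unfold Spec_get_vertices; infer_instance

-- ===== CLAIM (what is proved, stated in full; the proofs are below) =====
def Claim_equal_get_vertices : Prop := ∀ (edges : List (Int × Int)), Dom_get_vertices edges → Spec_get_vertices edges (get_vertices edges)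

-- ===== LEMMAS AND PROOFS =====

/-- Number a list of vertices by position: the association list both sides build. -/
def pvNumber (u : List Int) : List (Int × Int) :=
  (PySem.List.enumerate u 0).map (fun p => (p.2, p.1))

theorem pvNumber_append (u : List Int) (x : Int) :
    pvNumber (u ++ [x]) = pvNumber u ++ [(x, (u.length : Int))] := by
  simp [pvNumber, PySem.List.enumerate_append, PySem.List.enumerate_cons, PySem.List.enumerate_nil]

theorem pvContains_number (u : List Int) (x : Int) :
    (PySem.Dict.mk (pvNumber u)).contains x = u.contains x := by
  simp only [PySem.Dict.contains_mk, pvNumber, List.any_map]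
  rw [show ((fun p : Int × Int => p.1 == x) ∘ fun p : Int × Int => (p.2, p.1))
        = ((fun y => y == x) ∘ (fun p : Int × Int => p.2)) from rfl,
      ← List.any_map, PySem.List.map_snd_enumerate]
  rw [List.any_beq']

theorem pvSize_number (u : List Int) :
    (PySem.Dict.mk (pvNumber u)).size = u.length := by
  simp [PySem.Dict.size, pvNumber, PySem.List.length_enumerate]

theorem pvAdd_step (u : List Int) (x : Int) :
    (if (PySem.Dict.mk (pvNumber u)).contains x then PySem.Dict.mk (pvNumber u)
     else (PySem.Dict.mk (pvNumber u)).insert x (((PySem.Dict.mk (pvNumber u)).size : Nat) : Int))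
    = PySem.Dict.mk (pvNumber (PySem.Set.add u x)) := by
  rw [pvContains_number]
  by_cases h : u.contains x = true
  · simp [PySem.Set.add, PySem.Set.contains, List.contains_iff_mem.mp h]
  · have hs : PySem.Set.add u x = u ++ [x] := by
      simp [PySem.Set.add, PySem.Set.contains]
      intro hx
      exact absurd (List.contains_iff_mem.mpr hx) h
    rw [Bool.not_eq_true] at h
    simp only [h, Bool.false_eq_true, if_false]
    apply PySem.Dict.ext
    rw [PySem.Dict.items_insert_of_not_contains (h := by rw [pvContains_number]; exact h)]
    rw [hs, pvNumber_append, pvSize_number]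

/-- A's loop over edges computes the numbering of the first-appearance vertex order. -/
theorem pvLoop (edges : List (Int × Int)) (u : List Int) :
    edges.foldl (fun vertices edge =>
      let vertices := if vertices.contains edge.1 then vertices
        else vertices.insert edge.1 ((vertices.size : Nat) : Int)
      if vertices.contains edge.2 then vertices
        else vertices.insert edge.2 ((vertices.size : Nat) : Int))
      (PySem.Dict.mk (pvNumber u))
    = PySem.Dict.mk (pvNumber ((edges.flatMap (fun edge => [edge.1, edge.2])).foldl PySem.Set.add u)) := by
  induction edges generalizing u with
  | nil => rfl
  | cons e es ih =>
      simp only [List.foldl_cons, List.flatMap_cons, List.foldl_append]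
      rw [pvAdd_step, pvAdd_step, ih]
      rfl

/-- Invariant of B's timestamp loop: keys evolve by Set.add, and the stored
    timestamps stay strictly increasing along the items list. -/
theorem pvFirstInv (xs : List Int) (s : Int) (d : PySem.Dict Int Int)
    (hlt : ∀ p ∈ d.items, p.2 < s)
    (hpw : d.items.Pairwise (fun p q => p.2 < q.2)) :
    ((PySem.List.enumerate xs s).foldl
        (fun d p => if d.contains p.2 then d else d.insert p.2 p.1) d).keys
      = xs.foldl PySem.Set.add d.keys
    ∧ (∀ p ∈ ((PySem.List.enumerate xs s).foldl
        (fun d p => if d.contains p.2 then d else d.insert p.2 p.1) d).items, p.2 < s + xs.length)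
    ∧ ((PySem.List.enumerate xs s).foldl
        (fun d p => if d.contains p.2 then d else d.insert p.2 p.1) d).items.Pairwise
        (fun p q => p.2 < q.2) := by
  induction xs generalizing s d with
  | nil =>
      refine ⟨rfl, ?_, hpw⟩
      simpa using hlt
  | cons x t ih =>
      rw [PySem.List.enumerate_cons]
      simp only [List.foldl_cons]
      by_cases hc : d.contains x = true
      · simp only [hc, if_true]
        have hm : x ∈ d.keys := (PySem.Dict.contains_iff_mem_keys (d := d) (k := x)).mp hc
        have hadd : PySem.Set.add d.keys x = d.keys := by
          simp [PySem.Set.add, PySem.Set.contains, hm]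
        have hlt' : ∀ p ∈ d.items, p.2 < s + 1 := fun p hp => lt_trans (hlt p hp) (by omega)
        obtain ⟨h1, h2, h3⟩ := ih (s + 1) d hlt' hpw
        refine ⟨?_, ?_, h3⟩
        · rw [h1, hadd]
        · intro p hp
          have := h2 p hp
          simp only [List.length_cons] at *
          omega
      · rw [Bool.not_eq_true] at hc
        simp only [hc, Bool.false_eq_true, if_false]
        have hitems : (d.insert x s).items = d.items ++ [(x, s)] :=
          PySem.Dict.items_insert_of_not_contains d s hc
        have hkeys : (d.insert x s).keys = d.keys ++ [x] :=
          PySem.Dict.keys_insert_of_not_contains d s hc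
        have hadd : PySem.Set.add d.keys x = d.keys ++ [x] := by
          have hx : x ∉ d.keys := fun hx => by
            rw [(PySem.Dict.contains_iff_mem_keys (d := d) (k := x)).mpr hx] at hc
            exact absurd hc (by simp)
          simp [PySem.Set.add, PySem.Set.contains]
          intro h'
          exact absurd (List.contains_iff_mem.mp (by simpa using h')) hx
        have hlt' : ∀ p ∈ (d.insert x s).items, p.2 < s + 1 := by
          intro p hp
          rw [hitems] at hp
          rcases List.mem_append.mp hp with h | h
          · exact lt_trans (hlt p h) (by omega)
          · simp at h; simp [h]
        have hpw' : (d.insert x s).items.Pairwise (fun p q => p.2 < q.2) := by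
          rw [hitems]
          refine List.pairwise_append.mpr ⟨hpw, by simp, ?_⟩
          intro p hp q hq
          simp at hq
          rw [hq]
          exact hlt p hp
        obtain ⟨h1, h2, h3⟩ := ih (s + 1) (d.insert x s) hlt' hpw'
        refine ⟨?_, ?_, h3⟩
        · rw [h1, hkeys, hadd]
        · intro p hp
          have := h2 p hp
          simp only [List.length_cons] at *
          omega

-- ===== VERDICT (by name: the statement is the Claim_ definition above) =====
theorem get_vertices_spec : Claim_equal_get_vertices := by
  intro edges _
  unfold Spec_get_vertices get_vertices get_vertices_alt
  have h0 : (PySem.Dict.empty : PySem.Dict Int Int) = PySem.Dict.mk (pvNumber []) := rfl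
  rw [h0, pvLoop]
  set flat := edges.flatMap (fun edge => [edge.1, edge.2]) with hflat
  set first := (PySem.List.enumerate flat 0).foldl
      (fun d p => if d.contains p.2 then d else d.insert p.2 p.1)
      (PySem.Dict.empty : PySem.Dict Int Int) with hfirst
  obtain ⟨h1, _, h3⟩ := pvFirstInv flat 0 (PySem.Dict.empty : PySem.Dict Int Int)
    (by simp [PySem.Dict.empty]) (by simp [PySem.Dict.empty])
  rw [← hfirst] at h1 h3
  have hkeys : first.keys = flat.foldl PySem.Set.add [] := by
    simpa [PySem.Dict.keys, PySem.Dict.empty] using h1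
  have hnodup : first.keys.Nodup := by
    rw [hkeys, ← PySem.Set.ofList_eq_foldl]
    exact PySem.Set.nodup_ofList flat
  have hsorted : PySem.List.sorted first.keys (fun v => first.getD v 0) false = first.keys := by
    apply PySem.List.sorted_eq_self_of_pairwise
    have hip : first.items.Pairwise
        (fun p q : Int × Int => first.getD p.1 0 ≤ first.getD q.1 0) := by
      refine h3.imp_of_mem ?_
      intro p q hp hq hlt
      rw [PySem.Dict.getD_of_mem_items first hp hnodup, PySem.Dict.getD_of_mem_items first hq hnodup]
      exact le_of_lt hlt
    simp only [PySem.Dict.keys]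
    exact List.pairwise_map.mpr hip
  show pvNumber _ = (PySem.List.enumerate
      (PySem.List.sorted first.keys (fun v => first.getD v 0) false) 0).map (fun p => (p.2, p.1))
  rw [hsorted, hkeys]
  rfl
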